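-- pv_equiv track=rewrite | github.com/theElusiveJoe/BMSTU-IU9 | Formal Language Theory/lab2_regex_infixes/tools/brackets_helper.py | split_to_pathernesses
-- ===== SOURCE A (Python) =====
-- def split_to_pathernesses(whole_string):
--     """Принимает строку. Возвращает список подстрок
--     - содержимое скобочек нулевого уровня + сами скобочки"""
--     counter = 0
--     starts = []
--     for i, ch in enumerate(whole_string):
--         if ch == '(':
--             counter += 1
--             if counter == 1:
--                 starts.append(i)
--         elif ch == ')':
--             counter -= 1
--     starts.append(len(whole_string))
--     return [whole_string[starts[i]:starts[i+1]].strip() for i in range(len(starts)-1)]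
-- ===== SOURCE B (Python) =====
-- def split_to_pathernesses(whole_string):
--     counter = 0
--     started = False
--     cur = []
--     res = []
--     for ch in whole_string:
--         if ch == '(':
--             counter += 1
--             if counter == 1:
--                 if started:
--                     res.append(''.join(cur).strip())
--                     cur = []
--                 else:
--                     started = True
--         elif ch == ')':
--             counter -= 1
--         if started:
--             cur.append(ch)
--     if started:
--         res.append(''.join(cur).strip())
--     return res
-- ===== Notes on version B (the rewrite author's own statement) =====
-- stated objective: simpler
-- what changed: B replaces A's two-phase approach (collect the index table of top-level opening brackets, then slice the string between consecutive indices in a comprehension) with a single pass that accumulates each top-level group's characters directly into the current segment and flushes it when the next group starts.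
import Mathlib
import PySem

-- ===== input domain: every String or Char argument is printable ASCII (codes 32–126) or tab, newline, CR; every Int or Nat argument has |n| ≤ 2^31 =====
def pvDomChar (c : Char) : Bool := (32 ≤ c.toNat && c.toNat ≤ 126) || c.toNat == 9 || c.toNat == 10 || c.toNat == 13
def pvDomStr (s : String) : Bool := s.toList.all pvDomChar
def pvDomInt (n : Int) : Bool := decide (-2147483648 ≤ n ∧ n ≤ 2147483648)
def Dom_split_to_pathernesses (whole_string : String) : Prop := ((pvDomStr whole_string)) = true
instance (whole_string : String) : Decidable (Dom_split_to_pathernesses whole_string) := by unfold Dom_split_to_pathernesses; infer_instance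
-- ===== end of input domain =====

-- B is the same task by a different decomposition: one direct accumulating pass instead of A's
-- index table plus slicing comprehension; equal return value, no speed claim.

-- ===== PORT A =====
def split_to_pathernesses (whole_string : String) : List String :=
  let cs := whole_string.toList
  let st := (PySem.List.enumerate cs 0).foldl
    (fun (acc : Int × List Int) (ic : Int × Char) =>
      if ic.2 = '(' then
        let c := acc.1 + 1
        if c = 1 then (c, acc.2 ++ [ic.1]) else (c, acc.2)
      else if ic.2 = ')' then (acc.1 - 1, acc.2)
      else acc) (0, [])
  let starts := st.2 ++ [(cs.length : Int)]
  (List.range (starts.length - 1)).map (fun i =>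
    String.ofList (PySem.Chars.strip
      (PySem.List.slice cs (some (starts.getD i 0)) (some (starts.getD (i + 1) 0)))))

-- ===== PORT B =====
def split_to_pathernesses_alt (whole_string : String) : List String :=
  let st := whole_string.toList.foldl
    (fun (st : Int × Bool × List Char × List String) (ch : Char) =>
      let s1 :=
        if ch = '(' then
          let c := st.1 + 1
          if c = 1 then
            if st.2.1 then (c, true, ([] : List Char), st.2.2.2 ++ [String.ofList (PySem.Chars.strip st.2.2.1)])
            else (c, true, st.2.2.1, st.2.2.2)
          else (c, st.2.1, st.2.2.1, st.2.2.2)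
        else if ch = ')' then (st.1 - 1, st.2.1, st.2.2.1, st.2.2.2)
        else st
      if s1.2.1 then (s1.1, s1.2.1, s1.2.2.1 ++ [ch], s1.2.2.2) else s1)
    (0, false, [], [])
  if st.2.1 then st.2.2.2 ++ [String.ofList (PySem.Chars.strip st.2.2.1)] else st.2.2.2

-- ===== PRECONDITION & SPEC =====
def Spec_split_to_pathernesses (whole_string : String) (out : List String) : Prop := out = split_to_pathernesses_alt whole_string
instance (whole_string : String) (out : List String) : Decidable (Spec_split_to_pathernesses whole_string out) := by unfold Spec_split_to_pathernesses; infer_instance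

-- ===== CLAIM (what is proved, stated in full; the proofs are below) =====
def Claim_equal_split_to_pathernesses : Prop := ∀ (whole_string : String), Dom_split_to_pathernesses whole_string → Spec_split_to_pathernesses whole_string (split_to_pathernesses whole_string)

-- ===== LEMMAS AND PROOFS =====

/-- A's loop as a recursion: the indices (counted from `p`) of the top-level opening brackets of `l`,
with bracket counter `c`. -/
def aStarts : List Char → Int → Int → List Int
  | [], _, _ => []
  | ch :: t, p, c =>
    if ch = '(' then
      if c + 1 = 1 then p :: aStarts t (p + 1) (c + 1) else aStarts t (p + 1) (c + 1)
    else if ch = ')' then aStarts t (p + 1) (c - 1)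
    else aStarts t (p + 1) c

/-- B's loop as a recursion, seen from inside a segment: (rest of the current segment,
the following complete segments). -/
def collect : List Char → Int → List Char × List (List Char)
  | [], _ => ([], [])
  | ch :: t, c =>
    if ch = '(' then
      if c + 1 = 1 then
        let r := collect t (c + 1); ([], (ch :: r.1) :: r.2)
      else
        let r := collect t (c + 1); (ch :: r.1, r.2)
    else if ch = ')' then
      let r := collect t (c - 1); (ch :: r.1, r.2)
    else
      let r := collect t c; (ch :: r.1, r.2)

/-- Substrings of `l` (whose first char has index `p`) between consecutive index entries. -/
def pw : List Char → Int → List Int → List (List Char)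
  | l, p, a :: b :: r => ((l.drop (a - p).toNat).take (b.toNat - a.toNat)) :: pw l p (b :: r)
  | _, _, _ => []

def aStep : (Int × List Int) → (Int × Char) → (Int × List Int) :=
  fun acc ic =>
    if ic.2 = '(' then
      let c := acc.1 + 1
      if c = 1 then (c, acc.2 ++ [ic.1]) else (c, acc.2)
    else if ic.2 = ')' then (acc.1 - 1, acc.2)
    else acc

def bStep : (Int × Bool × List Char × List String) → Char → (Int × Bool × List Char × List String) :=
  fun st ch =>
    let s1 :=
      if ch = '(' then
        let c := st.1 + 1
        if c = 1 then
          if st.2.1 then (c, true, ([] : List Char), st.2.2.2 ++ [String.ofList (PySem.Chars.strip st.2.2.1)])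
          else (c, true, st.2.2.1, st.2.2.2)
        else (c, st.2.1, st.2.2.1, st.2.2.2)
      else if ch = ')' then (st.1 - 1, st.2.1, st.2.2.1, st.2.2.2)
      else st
    if s1.2.1 then (s1.1, s1.2.1, s1.2.2.1 ++ [ch], s1.2.2.2) else s1

def strOf (cs : List Char) : String := String.ofList (PySem.Chars.strip cs)

def bFinal (st : Int × Bool × List Char × List String) : List String :=
  if st.2.1 then st.2.2.2 ++ [String.ofList (PySem.Chars.strip st.2.2.1)] else st.2.2.2

theorem aStarts_ge : ∀ (l : List Char) (p c : Int), ∀ x ∈ aStarts l p c, p ≤ x := by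
  intro l
  induction l with
  | nil => intro p c x hx; simp [aStarts] at hx
  | cons ch t ih =>
    intro p c x hx
    simp only [aStarts] at hx
    split_ifs at hx with h1 h2 h3
    · rcases List.mem_cons.mp hx with rfl | hx'
      · exact le_refl _
      · have := ih (p + 1) (c + 1) x hx'; omega
    · have := ih (p + 1) (c + 1) x hx; omega
    · have := ih (p + 1) (c - 1) x hx; omega
    · have := ih (p + 1) c x hx; omega

theorem headI_append_ge (S : List Int) (e q : Int) (hS : ∀ x ∈ S, q ≤ x) (he : q ≤ e) :
    q ≤ (S ++ [e]).headI := by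
  cases S with
  | nil => simpa using he
  | cons a S' => simpa using hS a (by simp)

theorem pw_shift : ∀ (L : List Int) (ch : Char) (t : List Char) (p : Int),
    (∀ x ∈ L, p + 1 ≤ x) → pw (ch :: t) p L = pw t (p + 1) L := by
  intro L
  induction L with
  | nil => intro ch t p _; simp [pw]
  | cons a L' ihL =>
    intro ch t p hL
    cases L' with
    | nil => simp [pw]
    | cons b r =>
      have ha : p + 1 ≤ a := hL a (by simp)
      have h1 : (a - p).toNat = (a - (p + 1)).toNat + 1 := by omega
      simp only [pw, h1, List.drop_succ_cons]
      exact congrArg₂ List.cons rfl (ihL ch t p (fun x hx => hL x (by simp [hx])))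

theorem collect_spec : ∀ (l : List Char) (p c : Int), 0 ≤ p →
    (collect l c).1 = l.take (((aStarts l p c ++ [p + l.length]).headI - p).toNat) ∧
    (collect l c).2 = pw l p (aStarts l p c ++ [p + l.length]) := by
  intro l
  induction l with
  | nil => intro p c _; simp [collect, aStarts, pw]
  | cons ch t ih =>
    intro p c hp
    have hp1 : (0:Int) ≤ p + 1 := by omega
    have hshift : p + ((ch :: t).length : Int) = (p + 1) + (t.length : Int) := by
      simp only [List.length_cons]; push_cast; ring
    by_cases hstart : ch = '(' ∧ c + 1 = 1
    · obtain ⟨h1, h2⟩ := hstart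
      have hS := aStarts_ge t (p + 1) (c + 1)
      have IH := ih (p + 1) (c + 1) hp1
      obtain ⟨b, r', hbr⟩ : ∃ b r', aStarts t (p + 1) (c + 1) ++ [(p + 1) + (t.length : Int)] = b :: r' := by
        cases aStarts t (p + 1) (c + 1) <;> exact ⟨_, _, rfl⟩
      have hb : p + 1 ≤ b := by
        have := headI_append_ge (aStarts t (p + 1) (c + 1)) ((p + 1) + (t.length : Int)) (p + 1) hS (by omega)
        rw [hbr] at this; simpa using this
      have hmem : ∀ x ∈ (b :: r'), p + 1 ≤ x := by
        rw [← hbr]; intro x hx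
        rcases List.mem_append.mp hx with h | h
        · exact hS x h
        · simp at h; omega
      simp only [collect, aStarts, if_pos h1, if_pos h2]
      constructor
      · simp
      · rw [List.cons_append, hshift, hbr]
        simp only [pw]
        refine congrArg₂ List.cons ?_ ?_
        · have htn : (b.toNat - p.toNat) = (b - (p + 1)).toNat + 1 := by omega
          rw [show ((p:Int) - p).toNat = 0 by omega, List.drop_zero, htn, List.take_succ_cons]
          rw [IH.1, hbr]; simp
        · rw [pw_shift (b :: r') ch t p hmem, ← hbr, IH.2]
    · -- non-start step: the head char is consumed into the running segment
      obtain ⟨c', hA, hC⟩ : ∃ c', aStarts (ch :: t) p c = aStarts t (p + 1) c' ∧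
          collect (ch :: t) c = (ch :: (collect t c').1, (collect t c').2) := by
        by_cases h1 : ch = '('
        · have h2 : ¬ (c + 1 = 1) := fun h => hstart ⟨h1, h⟩
          exact ⟨c + 1, by simp only [aStarts, if_pos h1, if_neg h2], by simp only [collect, if_pos h1, if_neg h2]⟩
        · by_cases h3 : ch = ')'
          · exact ⟨c - 1, by simp only [aStarts, if_neg h1, if_pos h3], by simp only [collect, if_neg h1, if_pos h3]⟩
          · exact ⟨c, by simp only [aStarts, if_neg h1, if_neg h3], by simp only [collect, if_neg h1, if_neg h3]⟩
      have hS := aStarts_ge t (p + 1) c'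
      have IH := ih (p + 1) c' hp1
      have hh : p + 1 ≤ (aStarts t (p + 1) c' ++ [(p + 1) + (t.length : Int)]).headI :=
        headI_append_ge _ _ _ hS (by omega)
      have hmem : ∀ x ∈ aStarts t (p + 1) c' ++ [(p + 1) + (t.length : Int)], p + 1 ≤ x := by
        intro x hx
        rcases List.mem_append.mp hx with h | h
        · exact hS x h
        · simp at h; omega
      rw [hC, hA, hshift]
      constructor
      · have htn : ((aStarts t (p + 1) c' ++ [(p + 1) + (t.length : Int)]).headI - p).toNat
            = ((aStarts t (p + 1) c' ++ [(p + 1) + (t.length : Int)]).headI - (p + 1)).toNat + 1 := by omega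
        rw [htn, List.take_succ_cons, IH.1]
      · rw [pw_shift _ ch t p hmem, IH.2]

theorem aFold : ∀ (l : List Char) (p c : Int) (acc : List Int),
    ((PySem.List.enumerate l p).foldl aStep (c, acc)).2 = acc ++ aStarts l p c := by
  intro l
  induction l with
  | nil => intro p c acc; simp [PySem.List.enumerate, aStarts]
  | cons ch t ih =>
    intro p c acc
    rw [PySem.List.enumerate_cons, List.foldl_cons]
    simp only [aStep, aStarts]
    split_ifs with h1 h2
    · rw [ih]; simp
    · rw [ih]
    · rw [ih]
    · rw [ih]

theorem rangeMap (cs : List Char) : ∀ (L : List Int), (∀ x ∈ L, 0 ≤ x) →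
    (List.range (L.length - 1)).map (fun i =>
      strOf (PySem.List.slice cs (some (L.getD i 0)) (some (L.getD (i + 1) 0))))
    = (pw cs 0 L).map strOf := by
  intro L
  induction L with
  | nil => intro _; simp [pw]
  | cons a L' ihL =>
    intro hL
    cases L' with
    | nil => simp [pw]
    | cons b r =>
      have ha : (0:Int) ≤ a := hL a (by simp)
      have hb : (0:Int) ≤ b := hL b (by simp)
      have hlen : (a :: b :: r).length - 1 = (b :: r).length := rfl
      rw [hlen, show (b :: r).length = r.length + 1 from rfl, List.range_succ_eq_map, List.map_cons, List.map_map]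
      simp only [pw, List.map_cons]
      refine congrArg₂ List.cons ?_ ?_
      · simp [List.getD, PySem.List.slice_toNat cs ha hb]
      · rw [← ihL (fun x hx => hL x (by simp at hx ⊢; tauto))]
        apply List.map_congr_left
        intro i _
        simp [Function.comp]

theorem bFoldStarted : ∀ (l : List Char) (c : Int) (cur : List Char) (res : List String),
    bFinal (l.foldl bStep (c, true, cur, res))
      = res ++ strOf (cur ++ (collect l c).1) :: ((collect l c).2).map strOf := by
  intro l
  induction l with
  | nil => intro c cur res; simp [bFinal, collect, strOf]
  | cons ch t ih =>
    intro c cur res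
    rw [List.foldl_cons]
    by_cases h1 : ch = '('
    · by_cases h2 : c + 1 = 1
      · rw [show bStep (c, true, cur, res) ch
              = (c + 1, true, [] ++ [ch], res ++ [String.ofList (PySem.Chars.strip cur)]) from by
            simp [bStep, h1, h2]]
        rw [ih]; simp [collect, h1, h2, strOf, List.append_assoc]
      · rw [show bStep (c, true, cur, res) ch = (c + 1, true, cur ++ [ch], res) from by
            simp [bStep, h1, h2]]
        rw [ih]; simp [collect, h1, h2, List.append_assoc]
    · by_cases h3 : ch = ')'
      · rw [show bStep (c, true, cur, res) ch = (c - 1, true, cur ++ [ch], res) from by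
            simp [bStep, h3]]
        rw [ih]; simp [collect, h3, List.append_assoc]
      · rw [show bStep (c, true, cur, res) ch = (c, true, cur ++ [ch], res) from by
            simp [bStep, h1, h3]]
        rw [ih]; simp [collect, h1, h3, List.append_assoc]

theorem bFoldNot : ∀ (l : List Char) (c : Int) (res : List String),
    bFinal (l.foldl bStep (c, false, [], res)) = res ++ ((collect l c).2).map strOf := by
  intro l
  induction l with
  | nil => intro c res; simp [bFinal, collect]
  | cons ch t ih =>
    intro c res
    rw [List.foldl_cons]
    by_cases h1 : ch = '('
    · by_cases h2 : c + 1 = 1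
      · rw [show bStep (c, false, [], res) ch = (c + 1, true, [] ++ [ch], res) from by
            simp [bStep, h1, h2]]
        rw [bFoldStarted]; simp [collect, h1, h2]
      · rw [show bStep (c, false, [], res) ch = (c + 1, false, [], res) from by
            simp [bStep, h1, h2]]
        rw [ih]; simp [collect, h1, h2]
    · by_cases h3 : ch = ')'
      · rw [show bStep (c, false, [], res) ch = (c - 1, false, [], res) from by
            simp [bStep, h3]]
        rw [ih]; simp [collect, h3]
      · rw [show bStep (c, false, [], res) ch = (c, false, [], res) from by
            simp [bStep, h1, h3]]
        rw [ih]; simp [collect, h1, h3]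

theorem portA_closed (ws : String) :
    split_to_pathernesses ws
      = (pw ws.toList 0 (aStarts ws.toList 0 0 ++ [(ws.toList.length : Int)])).map strOf := by
  have h0 : split_to_pathernesses ws =
      (List.range ((((PySem.List.enumerate ws.toList 0).foldl aStep (0, [])).2 ++ [(ws.toList.length : Int)]).length - 1)).map
        (fun i => strOf (PySem.List.slice ws.toList
          (some ((((PySem.List.enumerate ws.toList 0).foldl aStep (0, [])).2 ++ [(ws.toList.length : Int)]).getD i 0))
          (some ((((PySem.List.enumerate ws.toList 0).foldl aStep (0, [])).2 ++ [(ws.toList.length : Int)]).getD (i + 1) 0)))) := rfl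
  rw [h0, aFold, List.nil_append]
  refine rangeMap ws.toList _ ?_
  intro x hx
  rcases List.mem_append.mp hx with h | h
  · exact aStarts_ge _ _ _ x h
  · simp at h; omega

theorem portB_closed (ws : String) :
    split_to_pathernesses_alt ws = ((collect ws.toList 0).2).map strOf := by
  have h0 : split_to_pathernesses_alt ws = bFinal (ws.toList.foldl bStep (0, false, [], [])) := rfl
  rw [h0, bFoldNot, List.nil_append]

-- ===== VERDICT (by name: the statement is the Claim_ definition above) =====
theorem split_to_pathernesses_spec : Claim_equal_split_to_pathernesses := by
  intro ws _
  unfold Spec_split_to_pathernesses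
  rw [portA_closed, portB_closed, (collect_spec ws.toList 0 0 (le_refl 0)).2, Int.zero_add]
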